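-- pv_equiv track=rewrite | github.com/imerej/TIPE | Reseau_de_neuronnes_GPT.py | nth_zero_index
-- ===== SOURCE A (Python) =====
-- def nth_zero_index(array, n):
--     for i in range(len(array)):
--         if array[i] != 0:
--             continue
--         if n == 0:
--             return i
--         n -= 1
--     return None
-- ===== SOURCE B (Python) =====
-- def nth_zero_index(array, n):
--     zeros = [i for i, x in enumerate(array) if x == 0]
--     if 0 <= n < len(zeros):
--         return zeros[n]
--     return None
-- ===== Notes on version B (the rewrite author's own statement) =====
-- stated objective: simpler
-- what changed: Replaces the interleaved decrementing-counter loop with early return by collect-all-zero-positions then a single bounds-checked index lookup.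
import Mathlib
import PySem

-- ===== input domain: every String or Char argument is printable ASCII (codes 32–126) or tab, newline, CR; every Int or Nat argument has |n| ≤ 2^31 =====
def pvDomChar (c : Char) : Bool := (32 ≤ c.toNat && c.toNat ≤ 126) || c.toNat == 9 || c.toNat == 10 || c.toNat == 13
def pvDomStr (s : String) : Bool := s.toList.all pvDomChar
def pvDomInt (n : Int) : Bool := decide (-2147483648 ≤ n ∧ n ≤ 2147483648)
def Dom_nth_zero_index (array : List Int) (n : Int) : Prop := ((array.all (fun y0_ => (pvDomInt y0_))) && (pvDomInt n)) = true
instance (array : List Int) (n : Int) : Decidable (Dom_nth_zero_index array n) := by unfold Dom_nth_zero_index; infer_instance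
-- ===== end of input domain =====

-- B replaces A's decrementing-counter loop by collecting all zero positions then one bounds-checked lookup (simpler decomposition, same cost).


-- ===== PORT A =====
-- loop over the elements with the running index i and the mutable counter n
def nthZeroGo : List Int → Int → Int → Option Int
  | [], _, _ => none
  | x :: xs, i, n =>
    if x ≠ 0 then nthZeroGo xs (i + 1) n
    else if n = 0 then some i
    else nthZeroGo xs (i + 1) (n - 1)

def nth_zero_index (array : List Int) (n : Int) : Option Int :=
  nthZeroGo array 0 n

-- ===== PORT B =====
def nth_zero_index_alt (array : List Int) (n : Int) : Option Int :=
  let zeros : List Int :=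
    ((PySem.List.enumerate array 0).filter (fun p => p.2 == 0)).map (fun p => p.1)
  if 0 ≤ n ∧ n < (zeros.length : Int) then zeros[n.toNat]? else none

-- ===== PRECONDITION & SPEC =====
def Spec_nth_zero_index (array : List Int) (n : Int) (out : Option Int) : Prop := out = nth_zero_index_alt array n
instance (array : List Int) (n : Int) (out : Option Int) : Decidable (Spec_nth_zero_index array n out) := by unfold Spec_nth_zero_index; infer_instance

-- ===== CLAIM (what is proved, stated in full; the proofs are below) =====
def Claim_equal_nth_zero_index : Prop := ∀ (array : List Int) (n : Int), Dom_nth_zero_index array n → Spec_nth_zero_index array n (nth_zero_index array n)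

-- ===== LEMMAS AND PROOFS =====

-- the list of zero positions of xs when indexing starts at s
def zerosFrom (xs : List Int) (s : Int) : List Int :=
  ((PySem.List.enumerate xs s).filter (fun p => p.2 == 0)).map (fun p => p.1)

theorem zerosFrom_nil (s : Int) : zerosFrom [] s = [] := rfl

theorem zerosFrom_cons (x : Int) (xs : List Int) (s : Int) :
    zerosFrom (x :: xs) s =
      if x = 0 then s :: zerosFrom xs (s + 1) else zerosFrom xs (s + 1) := by
  simp [zerosFrom, PySem.List.enumerate_cons, List.filter_cons]
  by_cases h : x = 0 <;> simp [h]

theorem nthZeroGo_eq (xs : List Int) (i n : Int) :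
    nthZeroGo xs i n =
      if 0 ≤ n ∧ n < ((zerosFrom xs i).length : Int)
      then (zerosFrom xs i)[n.toNat]? else none := by
  induction xs generalizing i n with
  | nil => simp [nthZeroGo, zerosFrom_nil]
  | cons x xs ih =>
    by_cases hx : x = 0
    · subst hx
      rw [zerosFrom_cons, if_pos rfl]
      simp only [nthZeroGo, ne_eq, not_true_eq_false, if_false]
      by_cases hn : n = 0
      · simp [hn]
      · rw [if_neg hn, ih]
        by_cases hpos : 0 ≤ n - 1
        · have hnn : n.toNat = (n - 1).toNat + 1 := by omega
          simp only [List.length_cons, hnn, List.getElem?_cons_succ]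
          split_ifs with h h' <;> first | rfl | (exfalso; omega)
        · rw [if_neg (by omega), if_neg (by omega)]
    · rw [zerosFrom_cons, if_neg hx]
      simp only [nthZeroGo, ne_eq, hx, not_false_eq_true, if_true]
      exact ih (i + 1) n

-- ===== VERDICT (by name: the statement is the Claim_ definition above) =====
theorem nth_zero_index_spec : Claim_equal_nth_zero_index := by
  intro array n _
  show nth_zero_index array n = nth_zero_index_alt array n
  rw [nth_zero_index, nthZeroGo_eq]
  rfl
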